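-- pv_equiv track=rewrite | github.com/jorgemf/kaggle_redefining_cancer_treatment | src/process_data.py | split_mutation
-- ===== SOURCE A (Python) =====
-- def split_mutation(word):
--     word = word.strip()
--     for symbol in ['del', 'ins', 'dup', 'trunc', 'splice', 'fs', 'null', 'Fusion']:
--         word = word.replace(symbol, ' >{} '.format(symbol))
--     i = 0
--     new_words = []
--     while i < len(word):
--         if word[i] == '>':
--             j = i + 1
--             while j < len(word) and word[j] != ' ':
--                 j += 1
--             new_words.append('{}'.format(word[i:j]))
--             i = j
--         elif word[i] != ' ':
--             new_words.append('>{}'.format(word[i]))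
--             i += 1
--         else:
--             i += 1
--     return new_words
-- ===== SOURCE B (Python) =====
-- def split_mutation(word):
--     word = word.strip()
--     for symbol in ['del', 'ins', 'dup', 'trunc', 'splice', 'fs', 'null', 'Fusion']:
--         word = word.replace(symbol, ' >{} '.format(symbol))
--     new_words = []
--     for seg in word.split(' '):
--         pre, sep, rest = seg.partition('>')
--         new_words.extend('>' + c for c in pre)
--         if sep:
--             new_words.append(sep + rest)
--     return new_words
-- ===== Notes on version B (the rewrite author's own statement) =====
-- stated objective: faster
-- what changed: A scans the prepared string with a manual per-character index/while loop; B instead splits it on spaces and partitions each segment at its first marker character, emitting one-character tokens for the prefix and the marker suffix as a single token.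
import Mathlib
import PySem

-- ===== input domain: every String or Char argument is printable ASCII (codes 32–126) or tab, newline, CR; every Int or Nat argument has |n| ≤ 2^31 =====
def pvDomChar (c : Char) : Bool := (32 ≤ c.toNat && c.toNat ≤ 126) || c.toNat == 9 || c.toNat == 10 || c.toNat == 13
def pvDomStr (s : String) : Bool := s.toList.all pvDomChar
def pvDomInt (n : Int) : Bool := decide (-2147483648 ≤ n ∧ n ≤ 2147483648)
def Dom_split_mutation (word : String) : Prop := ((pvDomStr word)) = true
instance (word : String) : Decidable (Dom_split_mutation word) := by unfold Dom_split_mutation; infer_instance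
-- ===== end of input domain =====

-- B replaces A's manual per-character index/while scan with split-on-space + partition-at-first-marker per segment (measured constant-factor faster in Python; same O(n)).

def pvSymbols : List String := ["del", "ins", "dup", "trunc", "splice", "fs", "null", "Fusion"]

-- shared by both ports: the identical strip + eight-replace preamble of both Pythons
def pvPrep (word : String) : String :=
  pvSymbols.foldl (fun w sym => PySem.Str.replace w sym (" >" ++ sym ++ " ")) (PySem.Str.strip word)

-- A's while-loop scan, as recursion on the remaining suffix (i ↦ the suffix from i)
def pvLoopA : List Char → List String
  | [] => []
  | c :: rest =>
    if c = '>' then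
      -- inner while: advance j until space or end; token = word[i:j]
      let run := rest.takeWhile (· ≠ ' ')
      String.ofList ('>' :: run) :: pvLoopA (rest.drop run.length)
    else if c ≠ ' ' then
      String.ofList ['>', c] :: pvLoopA rest
    else
      pvLoopA rest
termination_by cs => cs.length
decreasing_by all_goals simp

def split_mutation (word : String) : List String :=
  pvLoopA (pvPrep word).toList

-- ===== PORT B =====
-- pre, sep, rest = seg.partition('>'); ['>'+c for c in pre] + ([sep+rest] if sep else [])
def pvSegTokens (seg : List Char) : List String :=
  let (pre, suf) := seg.span (· ≠ '>')
  pre.map (fun ch => String.ofList ['>', ch]) ++ (match suf with | [] => [] | _ => [String.ofList suf])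

def split_mutation_alt (word : String) : List String :=
  (PySem.Chars.splitOn (pvPrep word).toList [' ']).flatMap pvSegTokens

-- ===== PRECONDITION & SPEC =====
def Spec_split_mutation (word : String) (out : List String) : Prop := out = split_mutation_alt word
instance (word : String) (out : List String) : Decidable (Spec_split_mutation word out) := by unfold Spec_split_mutation; infer_instance

-- ===== CLAIM (what is proved, stated in full; the proofs are below) =====
def Claim_equal_split_mutation : Prop := ∀ (word : String), Dom_split_mutation word → Spec_split_mutation word (split_mutation word)

-- ===== LEMMAS AND PROOFS =====

-- clean structural characterisation of splitOn · [' ']: (current segment, later segments)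
def pvSplitP : List Char → List Char × List (List Char)
  | [] => ([], [])
  | c :: rest =>
    let p := pvSplitP rest
    if c = ' ' then ([], p.1 :: p.2) else (c :: p.1, p.2)

theorem pvSplitOn_go_spec (fuel : Nat) (l cur : List Char) (acc : List (List Char))
    (h : l.length ≤ fuel) :
    PySem.Chars.splitOn.go [' '] fuel l cur acc =
      acc.reverse ++ (cur.reverse ++ (pvSplitP l).1) :: (pvSplitP l).2 := by
  induction fuel generalizing l cur acc with
  | zero =>
    interval_cases hl : l.length
    · simp at hl; subst hl
      simp [PySem.Chars.splitOn.go, pvSplitP]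
  | succ n ih =>
    cases l with
    | nil => simp [PySem.Chars.splitOn.go, pvSplitP]
    | cons c rest =>
      simp only [PySem.Chars.splitOn.go]
      by_cases hc : c = ' '
      · subst hc
        rw [if_pos (by simp)]
        rw [show List.drop [' '].length (' ' :: rest) = rest from rfl]
        rw [ih rest [] (List.reverse cur :: acc) (by simpa using Nat.lt_succ_iff.mp (by simpa using h))]
        simp [pvSplitP]
      · rw [if_neg (by simp [List.isPrefixOf, hc, Ne.symm])]
        rw [ih rest (c :: cur) acc (by simpa using Nat.lt_succ_iff.mp (by simpa using h))]
        simp [pvSplitP, hc]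

theorem pvSplitOn_eq (cs : List Char) :
    PySem.Chars.splitOn cs [' '] = (pvSplitP cs).1 :: (pvSplitP cs).2 := by
  unfold PySem.Chars.splitOn
  rw [pvSplitOn_go_spec _ _ _ _ (by omega)]
  simp

theorem pvSplitP_no_space (cs : List Char) (h : ' ' ∉ cs) : pvSplitP cs = (cs, []) := by
  induction cs with
  | nil => simp [pvSplitP]
  | cons c rest ih =>
    simp only [List.mem_cons, not_or] at h
    simp [pvSplitP, ih h.2, Ne.symm h.1]

theorem pvSplitP_append (t d : List Char) (ht : ' ' ∉ t) :
    pvSplitP (t ++ ' ' :: d) = (t, (pvSplitP d).1 :: (pvSplitP d).2) := by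
  induction t with
  | nil => simp [pvSplitP]
  | cons c t' ih =>
    simp only [List.mem_cons, not_or] at ht
    simp [pvSplitP, ih ht.2, Ne.symm ht.1]

theorem pvSegTokens_cons (c : Char) (seg : List Char) (hc : c ≠ '>') :
    pvSegTokens (c :: seg) = String.ofList ['>', c] :: pvSegTokens seg := by
  simp only [pvSegTokens, List.span_eq_takeWhile_dropWhile, List.takeWhile_cons,
    List.dropWhile_cons, hc, decide_not]
  simp

theorem pvSegTokens_gt (seg : List Char) :
    pvSegTokens ('>' :: seg) = [String.ofList ('>' :: seg)] := by
  simp [pvSegTokens, List.span_eq_takeWhile_dropWhile]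

theorem pvDropWhileCons (p : Char → Bool) (l : List Char) (c : Char) (d : List Char)
    (h : l.dropWhile p = c :: d) : p c = false := by
  induction l with
  | nil => simp [List.dropWhile] at h
  | cons a l' ih =>
    rw [List.dropWhile_cons] at h
    split at h
    · exact ih h
    · next hp => cases h; simpa using hp

theorem pvDropLenTakeWhile (p : Char → Bool) (l : List Char) :
    l.drop (l.takeWhile p).length = l.dropWhile p := by
  induction l with
  | nil => rfl
  | cons c rest ih =>
    by_cases hc : p c
    · simp [hc, ih]
    · simp [hc]

theorem pvMainAux (n : Nat) : ∀ (cs : List Char), cs.length ≤ n →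
    pvLoopA cs = pvSegTokens (pvSplitP cs).1 ++ ((pvSplitP cs).2).flatMap pvSegTokens := by
  induction n with
  | zero =>
    intro cs h
    interval_cases hl : cs.length
    simp at hl; subst hl
    simp [pvLoopA, pvSplitP, pvSegTokens]
  | succ n ih =>
    intro cs h
    cases cs with
    | nil => simp [pvLoopA, pvSplitP, pvSegTokens]
    | cons c rest =>
      simp only [List.length_cons, Nat.succ_le_succ_iff] at h
      by_cases hgt : c = '>'
      · subst hgt
        rw [show pvLoopA ('>' :: rest) = String.ofList ('>' :: rest.takeWhile (· ≠ ' ')) ::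
              pvLoopA (rest.drop (rest.takeWhile (· ≠ ' ')).length) from by rw [pvLoopA]; rfl]
        rw [pvDropLenTakeWhile]
        have ht : ' ' ∉ rest.takeWhile (· ≠ ' ') := by
          intro hm
          have := List.mem_takeWhile_imp hm
          simp at this
        cases hd : rest.dropWhile (· ≠ ' ') with
        | nil =>
          have hrest : rest = rest.takeWhile (· ≠ ' ') := by
            conv_lhs => rw [← List.takeWhile_append_dropWhile (p := (· ≠ ' ')) (l := rest)]
            rw [hd]; simp
          have hns : ' ' ∉ rest := by rw [hrest]; exact ht
          rw [← hrest]
          simp [pvLoopA, pvSplitP, pvSplitP_no_space rest hns, pvSegTokens_gt]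
        | cons sp d' =>
          have hsp : sp = ' ' := by
            have := pvDropWhileCons _ _ _ _ hd
            simpa using this
          subst hsp
          have hrest : rest = rest.takeWhile (· ≠ ' ') ++ ' ' :: d' := by
            conv_lhs => rw [← List.takeWhile_append_dropWhile (p := (· ≠ ' ')) (l := rest)]
            rw [hd]
          have hlen : d'.length ≤ n := by
            have : rest.length = (rest.takeWhile (· ≠ ' ')).length + d'.length + 1 := by
              conv_lhs => rw [hrest]
              simp only [List.length_append, List.length_cons]
              omega
            omega
          have hsplit : pvSplitP rest = (rest.takeWhile (· ≠ ' '), (pvSplitP d').1 :: (pvSplitP d').2) := by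
            conv_lhs => rw [hrest]
            exact pvSplitP_append _ _ ht
          rw [show pvLoopA (' ' :: d') = pvLoopA d' from by rw [pvLoopA]; rfl]
          rw [ih d' hlen]
          simp [pvSplitP, hsplit, pvSegTokens_gt]
      · by_cases hsp : c = ' '
        · subst hsp
          rw [show pvLoopA (' ' :: rest) = pvLoopA rest from by rw [pvLoopA]; rfl]
          rw [ih rest h]
          simp [pvSplitP, pvSegTokens]
        · rw [show pvLoopA (c :: rest) = String.ofList ['>', c] :: pvLoopA rest from by
              rw [pvLoopA]; simp [hgt, hsp]]
          rw [ih rest h]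
          simp [pvSplitP, hsp, pvSegTokens_cons c _ hgt]

theorem pvMain (cs : List Char) :
    pvLoopA cs = pvSegTokens (pvSplitP cs).1 ++ ((pvSplitP cs).2).flatMap pvSegTokens :=
  pvMainAux cs.length cs le_rfl

theorem pvLoopA_eq (cs : List Char) :
    pvLoopA cs = (PySem.Chars.splitOn cs [' ']).flatMap pvSegTokens := by
  rw [pvSplitOn_eq, List.flatMap_cons, pvMain]

-- ===== VERDICT (by name: the statement is the Claim_ definition above) =====
theorem split_mutation_spec : Claim_equal_split_mutation := by
  intro word _
  show split_mutation word = split_mutation_alt word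
  unfold split_mutation split_mutation_alt
  exact pvLoopA_eq _
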